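-- pv_equiv track=rewrite | github.com/PrincetonUniversity/prga.py | prga/passes/flow.py | __key_is_prefix
-- ===== SOURCE A (Python) =====
-- def __key_is_prefix(key, other):
--     """Check if ``key`` is a prefix of ``other``.
--
--     Args:
--         key (:obj:`str`): Dot-separated key list
--         other (:obj:`str`): Dot-separated key list
--
--     Returns:
--         :obj:`bool`:
--     """
--     key, other = map(lambda x: x.split('.'), (key, other))
--     if len(key) > len(other):
--         return False
--     for s, o in zip(key, other):
--         if s != o:
--             return False
--     return True
-- ===== SOURCE B (Python) =====
-- def __key_is_prefix(key, other):
--     """Check if ``key`` is a prefix of ``other``.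
--
--     Args:
--         key (:obj:`str`): Dot-separated key list
--         other (:obj:`str`): Dot-separated key list
--
--     Returns:
--         :obj:`bool`:
--     """
--     return key == other or other.startswith(key + '.')
-- ===== Notes on version B (the rewrite author's own statement) =====
-- stated objective: idiomatic
-- what changed: Drops the split-into-segment-lists and the element-by-element zip loop; the dotted-prefix relation is decided directly on the raw strings as equality or a single startswith(key + '.') check.
import Mathlib
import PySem

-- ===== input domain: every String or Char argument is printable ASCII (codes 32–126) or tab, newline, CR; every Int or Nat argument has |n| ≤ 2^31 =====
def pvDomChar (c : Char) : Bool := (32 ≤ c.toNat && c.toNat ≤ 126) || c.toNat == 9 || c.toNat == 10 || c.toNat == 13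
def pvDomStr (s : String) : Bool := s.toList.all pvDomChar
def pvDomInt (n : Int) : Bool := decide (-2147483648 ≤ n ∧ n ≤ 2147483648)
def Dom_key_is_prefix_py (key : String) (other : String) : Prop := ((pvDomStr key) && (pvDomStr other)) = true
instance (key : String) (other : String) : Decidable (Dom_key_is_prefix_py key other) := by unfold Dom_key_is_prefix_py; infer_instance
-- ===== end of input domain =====

-- B replaces A's split-into-segment-lists and zip loop by `key == other or other.startswith(key + '.')` on the raw strings (idiomatic; same cost).

-- ===== PORT A =====
-- the `for s, o in zip(key, other): if s != o: return False` loop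
def pvGoA : List (List Char × List Char) → Bool
  | [] => true
  | (s, o) :: rest => if s ≠ o then false else pvGoA rest

def key_is_prefix_py (key : String) (other : String) : Bool :=
  let k := PySem.Chars.splitOn key.toList ['.']
  let o := PySem.Chars.splitOn other.toList ['.']
  if k.length > o.length then false
  else pvGoA (k.zip o)

-- ===== PORT B =====
def key_is_prefix_py_alt (key : String) (other : String) : Bool :=
  -- `key == other or other.startswith(key + '.')`; the concatenation `key + '.'` is done on .toList (Lean's String ++ is kernel-opaque)
  key == other || PySem.Chars.startswith other.toList (key.toList ++ ['.'])

-- ===== PRECONDITION & SPEC =====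
def Spec_key_is_prefix_py (key : String) (other : String) (out : Bool) : Prop := out = key_is_prefix_py_alt key other
instance (key : String) (other : String) (out : Bool) : Decidable (Spec_key_is_prefix_py key other out) := by unfold Spec_key_is_prefix_py; infer_instance

-- ===== CLAIM (what is proved, stated in full; the proofs are below) =====
def Claim_equal_key_is_prefix_py : Prop := ∀ (key : String) (other : String), Dom_key_is_prefix_py key other → Spec_key_is_prefix_py key other (key_is_prefix_py key other)

-- ===== LEMMAS AND PROOFS =====

-- first dot-separated piece and the remaining pieces of a char list
def pvSplitDot : List Char → List Char × List (List Char)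
  | [] => ([], [])
  | c :: rest =>
    if c = '.' then ([], (pvSplitDot rest).1 :: (pvSplitDot rest).2)
    else (c :: (pvSplitDot rest).1, (pvSplitDot rest).2)

theorem pvGo_eq (fuel : Nat) (l cur : List Char) (acc : List (List Char))
    (h : l.length < fuel) :
    PySem.Chars.splitOn.go ['.'] fuel l cur acc
      = acc.reverse ++ (cur.reverse ++ (pvSplitDot l).1) :: (pvSplitDot l).2 := by
  induction fuel generalizing l cur acc with
  | zero => omega
  | succ n ih =>
    cases l with
    | nil => simp [PySem.Chars.splitOn.go, pvSplitDot]
    | cons c rest =>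
      by_cases hc : c = '.'
      · subst hc
        rw [show PySem.Chars.splitOn.go ['.'] (n+1) ('.' :: rest) cur acc
              = PySem.Chars.splitOn.go ['.'] n rest [] (cur.reverse :: acc) by
            simp [PySem.Chars.splitOn.go, List.isPrefixOf]]
        rw [ih rest [] (cur.reverse :: acc) (by simpa using Nat.lt_of_succ_lt_succ h)]
        simp [pvSplitDot]
      · rw [show PySem.Chars.splitOn.go ['.'] (n+1) (c :: rest) cur acc
              = PySem.Chars.splitOn.go ['.'] n rest (c :: cur) acc by
            simp [PySem.Chars.splitOn.go, List.isPrefixOf, Ne.symm hc]]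
        rw [ih rest (c :: cur) acc (by simpa using Nat.lt_of_succ_lt_succ h)]
        simp [pvSplitDot, hc]

theorem pvSplitOn_eq (s : List Char) :
    PySem.Chars.splitOn s ['.'] = (pvSplitDot s).1 :: (pvSplitDot s).2 := by
  rw [show PySem.Chars.splitOn s ['.'] = PySem.Chars.splitOn.go ['.'] (s.length + 1) s [] [] from rfl]
  rw [pvGo_eq (s.length + 1) s [] [] (by omega)]
  simp

-- segment-list prefix ↔ raw-string relation
theorem pvSplitDot_prefix_iff (k o : List Char) :
    ((pvSplitDot k).1 :: (pvSplitDot k).2 <+: (pvSplitDot o).1 :: (pvSplitDot o).2)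
      ↔ (k = o ∨ (k ++ ['.']) <+: o) := by
  induction k generalizing o with
  | nil =>
    cases o with
    | nil => simp [pvSplitDot]
    | cons d o' =>
      by_cases hd : d = '.'
      · subst hd; simp [pvSplitDot, List.cons_prefix_cons]
      · simp [pvSplitDot, hd, List.cons_prefix_cons, Ne.symm hd]
  | cons c k' ih =>
    cases o with
    | nil =>
      by_cases hc : c = '.' <;>
        simp [pvSplitDot, hc, List.cons_prefix_cons]
    | cons d o' =>
      by_cases hc : c = '.' <;> by_cases hd : d = '.'
      · subst hc; subst hd
        rw [show pvSplitDot ('.' :: k') = ([], (pvSplitDot k').1 :: (pvSplitDot k').2) from by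
              simp [pvSplitDot]]
        rw [show pvSplitDot ('.' :: o') = ([], (pvSplitDot o').1 :: (pvSplitDot o').2) from by
              simp [pvSplitDot]]
        rw [show ('.' :: k' = '.' :: o' ∨ ('.' :: k') ++ ['.'] <+: '.' :: o')
              ↔ (k' = o' ∨ k' ++ ['.'] <+: o') from by simp [List.cons_prefix_cons]]
        rw [← ih o']
        simp [List.cons_prefix_cons]
      · subst hc
        simp [pvSplitDot, hd, List.cons_prefix_cons, Ne.symm hd]
      · subst hd
        simp [pvSplitDot, hc, List.cons_prefix_cons]
      · rw [show pvSplitDot (c :: k') = (c :: (pvSplitDot k').1, (pvSplitDot k').2) from by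
              simp [pvSplitDot, hc]]
        rw [show pvSplitDot (d :: o') = (d :: (pvSplitDot o').1, (pvSplitDot o').2) from by
              simp [pvSplitDot, hd]]
        simp only [List.cons_prefix_cons, List.cons.injEq, List.cons_append]
        constructor
        · rintro ⟨⟨rfl, h1⟩, h2⟩
          rcases (ih o').mp (List.cons_prefix_cons.mpr ⟨h1, h2⟩) with rfl | h'
          · exact Or.inl ⟨rfl, rfl⟩
          · exact Or.inr ⟨rfl, h'⟩
        · rintro (⟨rfl, rfl⟩ | ⟨rfl, h⟩)
          · exact ⟨⟨rfl, rfl⟩, List.prefix_refl _⟩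
          · have := List.cons_prefix_cons.mp ((ih o').mpr (Or.inr h))
            exact ⟨⟨rfl, this.1⟩, this.2⟩

-- A's zip loop decides the list-prefix relation (given the length guard)
theorem pvGoA_prefix (ks os : List (List Char)) (h : ks.length ≤ os.length) :
    pvGoA (ks.zip os) = true ↔ ks <+: os := by
  induction ks generalizing os with
  | nil => simp [pvGoA]
  | cons s ks' ih =>
    cases os with
    | nil => simp at h
    | cons o os' =>
      simp only [List.zip_cons_cons, pvGoA, List.cons_prefix_cons]
      by_cases hso : s = o
      · subst hso; simpa using ih os' (by simpa using h)
      · simp [hso]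

-- ===== VERDICT (by name: the statement is the Claim_ definition above) =====
theorem key_is_prefix_py_spec : Claim_equal_key_is_prefix_py := by
  intro key other _
  unfold Spec_key_is_prefix_py key_is_prefix_py key_is_prefix_py_alt
  simp only [pvSplitOn_eq]
  set ks := (pvSplitDot key.toList).1 :: (pvSplitDot key.toList).2 with hks
  set os := (pvSplitDot other.toList).1 :: (pvSplitDot other.toList).2 with hos
  have hiff : (ks <+: os) ↔ (key = other ∨ key.toList ++ ['.'] <+: other.toList) := by
    rw [hks, hos, pvSplitDot_prefix_iff]
    exact or_congr_left String.toList_inj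
  by_cases hl : ks.length > os.length
  · have hnp : ¬ (ks <+: os) := fun hp => absurd hp.length_le (by omega)
    rw [if_pos hl]
    symm
    rw [Bool.or_eq_false_iff]
    refine ⟨beq_eq_false_iff_ne.mpr ?_, ?_⟩
    · intro h; exact hnp (hiff.mpr (Or.inl h))
    · rw [Bool.eq_false_iff]
      intro h
      exact hnp (hiff.mpr (Or.inr ((PySem.Chars.startswith_iff _ _).mp h)))
  · rw [if_neg hl]
    rw [Bool.eq_iff_iff]
    rw [pvGoA_prefix ks os (by omega), hiff]
    simp [PySem.Chars.startswith_iff]
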